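-- pv_equiv track=rewrite | github.com/TheRainbowPhoenix/RPG-MV-Ace | tools/mv_mz_method_diff.py | diff_methods
-- ===== SOURCE A (Python) =====
-- from typing import Dict, Tuple, List
--
-- def diff_methods(a: Dict[str, Dict], b: Dict[str, Dict]) -> Dict[str, List]:
--     a_keys = set(a.keys())
--     b_keys = set(b.keys())
--     added = sorted(list(b_keys - a_keys))
--     removed = sorted(list(a_keys - b_keys))
--     changed = sorted([k for k in (a_keys & b_keys) if a[k]["hash"] != b[k]["hash"]])
--     unchanged = sorted([k for k in (a_keys & b_keys) if a[k]["hash"] == b[k]["hash"]])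
--     return {
--         "added": added,
--         "removed": removed,
--         "changed": changed,
--         "unchanged": unchanged,
--     }
-- ===== SOURCE B (Python) =====
-- from typing import Dict, List
--
-- def diff_methods(a: Dict[str, Dict], b: Dict[str, Dict]) -> Dict[str, List]:
--     added, removed, changed, unchanged = [], [], [], []
--     union = list(a.keys()) + [k for k in b.keys() if k not in a]
--     for k in union:
--         if k not in a:
--             added.append(k)
--         elif k not in b:
--             removed.append(k)
--         elif a[k]["hash"] != b[k]["hash"]:
--             changed.append(k)
--         else:
--             unchanged.append(k)
--     return {
--         "added": sorted(added),
--         "removed": sorted(removed),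
--         "changed": sorted(changed),
--         "unchanged": sorted(unchanged),
--     }
-- ===== Notes on version B (the rewrite author's own statement) =====
-- stated objective: simpler
-- what changed: A builds two key-sets and computes four separate set operations/comprehensions (difference, difference, two filtered intersections); B makes one pass over the union of keys, classifying each key into one of four buckets with an if/elif chain, then sorts the buckets.
import Mathlib
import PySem

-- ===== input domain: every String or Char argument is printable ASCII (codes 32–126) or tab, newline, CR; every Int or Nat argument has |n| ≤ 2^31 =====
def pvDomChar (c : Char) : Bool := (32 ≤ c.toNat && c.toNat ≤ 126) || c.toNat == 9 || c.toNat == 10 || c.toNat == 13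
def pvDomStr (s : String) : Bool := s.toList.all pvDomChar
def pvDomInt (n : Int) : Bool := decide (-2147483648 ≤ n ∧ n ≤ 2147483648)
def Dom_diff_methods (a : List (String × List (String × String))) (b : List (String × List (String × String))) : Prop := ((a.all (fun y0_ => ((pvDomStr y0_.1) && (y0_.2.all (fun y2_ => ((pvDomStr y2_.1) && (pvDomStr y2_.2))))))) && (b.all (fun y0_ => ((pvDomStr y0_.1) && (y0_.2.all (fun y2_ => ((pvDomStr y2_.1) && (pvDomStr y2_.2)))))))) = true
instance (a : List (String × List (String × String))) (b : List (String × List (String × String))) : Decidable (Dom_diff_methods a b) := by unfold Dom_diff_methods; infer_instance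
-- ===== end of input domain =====

-- B replaces A's four set operations/comprehensions by a single classifying pass over the
-- union of keys (simpler decomposition, same cost); equivalence of return values is proved below.

-- ===== PORT A =====
def diff_methods (a : List (String × List (String × String))) (b : List (String × List (String × String))) : List (String × List String) :=
  let da := PySem.Dict.ofList a
  let db := PySem.Dict.ofList b
  let aKeys : PySem.Set String := PySem.Set.ofList da.keys
  let bKeys : PySem.Set String := PySem.Set.ofList db.keys
  let added := PySem.List.sorted (PySem.Set.diff bKeys aKeys) (fun x => x)
  let removed := PySem.List.sorted (PySem.Set.diff aKeys bKeys) (fun x => x)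
  let changed := PySem.List.sorted
      (List.filter (fun k => !((PySem.Dict.ofList (da.getD k [])).get? "hash" == (PySem.Dict.ofList (db.getD k [])).get? "hash"))
        (PySem.Set.inter aKeys bKeys)) (fun x => x)
  let unchanged := PySem.List.sorted
      (List.filter (fun k => ((PySem.Dict.ofList (da.getD k [])).get? "hash" == (PySem.Dict.ofList (db.getD k [])).get? "hash"))
        (PySem.Set.inter aKeys bKeys)) (fun x => x)
  [("added", added), ("removed", removed), ("changed", changed), ("unchanged", unchanged)]

-- ===== PORT B =====
def diff_methods_alt (a : List (String × List (String × String))) (b : List (String × List (String × String))) : List (String × List String) :=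
  let da := PySem.Dict.ofList a
  let db := PySem.Dict.ofList b
  let union := da.keys ++ List.filter (fun k => !da.contains k) db.keys
  let buckets := union.foldl (fun acc k =>
      if !da.contains k then (acc.1 ++ [k], acc.2.1, acc.2.2.1, acc.2.2.2)
      else if !db.contains k then (acc.1, acc.2.1 ++ [k], acc.2.2.1, acc.2.2.2)
      else if !((PySem.Dict.ofList (da.getD k [])).get? "hash" == (PySem.Dict.ofList (db.getD k [])).get? "hash")
        then (acc.1, acc.2.1, acc.2.2.1 ++ [k], acc.2.2.2)
        else (acc.1, acc.2.1, acc.2.2.1, acc.2.2.2 ++ [k]))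
    (([], [], [], []) : List String × List String × List String × List String)
  [("added", PySem.List.sorted buckets.1 (fun x => x)),
   ("removed", PySem.List.sorted buckets.2.1 (fun x => x)),
   ("changed", PySem.List.sorted buckets.2.2.1 (fun x => x)),
   ("unchanged", PySem.List.sorted buckets.2.2.2 (fun x => x))]

-- ===== PRECONDITION & SPEC =====
-- Pre_ excludes exactly the inputs on which Python A raises KeyError: a key present in both
-- dicts whose entry in either dict lacks the "hash" key.
def Pre_diff_methods (a : List (String × List (String × String))) (b : List (String × List (String × String))) : Prop :=
  ∀ p ∈ a, (PySem.Dict.ofList b).contains p.1 = true →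
    (PySem.Dict.ofList ((PySem.Dict.ofList a).getD p.1 [])).contains "hash" = true ∧
    (PySem.Dict.ofList ((PySem.Dict.ofList b).getD p.1 [])).contains "hash" = true
instance (a : List (String × List (String × String))) (b : List (String × List (String × String))) : Decidable (Pre_diff_methods a b) := by unfold Pre_diff_methods; infer_instance

def pvWitness_diff_methods : (List (String × List (String × String))) × (List (String × List (String × String))) :=
  ([("m", [("hash", "1")]), ("r", [])], [("m", [("hash", "2")]), ("n", [("hash", "3")])])

def Spec_diff_methods (a : List (String × List (String × String))) (b : List (String × List (String × String))) (out : List (String × List String)) : Prop := out = diff_methods_alt a b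
instance (a : List (String × List (String × String))) (b : List (String × List (String × String))) (out : List (String × List String)) : Decidable (Spec_diff_methods a b out) := by unfold Spec_diff_methods; infer_instance

-- ===== CLAIM (what is proved, stated in full; the proofs are below) =====
def Claim_equal_diff_methods : Prop := ∀ (a : List (String × List (String × String))) (b : List (String × List (String × String))), Dom_diff_methods a b → Pre_diff_methods a b → Spec_diff_methods a b (diff_methods a b)

-- ===== LEMMAS AND PROOFS =====

-- B's single classifying fold is four filters of the traversed list.
theorem foldB_char (cA cB h : String → Bool) (l : List String)
    (ad rm ch un : List String) :
    l.foldl (fun acc k =>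
      if !cA k then (acc.1 ++ [k], acc.2.1, acc.2.2.1, acc.2.2.2)
      else if !cB k then (acc.1, acc.2.1 ++ [k], acc.2.2.1, acc.2.2.2)
      else if !h k then (acc.1, acc.2.1, acc.2.2.1 ++ [k], acc.2.2.2)
      else (acc.1, acc.2.1, acc.2.2.1, acc.2.2.2 ++ [k])) (ad, rm, ch, un)
    = (ad ++ l.filter (fun k => !cA k),
       rm ++ l.filter (fun k => cA k && !cB k),
       ch ++ l.filter (fun k => cA k && cB k && !h k),
       un ++ l.filter (fun k => cA k && cB k && h k)) := by
  induction l generalizing ad rm ch un with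
  | nil => simp
  | cons k l ih =>
    rw [List.foldl_cons]
    cases hA : cA k
    · simp only [Bool.not_false, reduceIte]
      rw [ih]
      simp [hA]
    · cases hB : cB k
      · simp only [Bool.not_true, Bool.not_false, reduceIte]
        rw [ih]
        simp [hA, hB]
      · cases hh : h k
        · simp only [Bool.not_true, Bool.not_false, reduceIte]
          rw [ih]
          simp [hA, hB, hh]
        · simp only [Bool.not_true]
          rw [ih]
          simp [hA, hB, hh]

theorem diff_methods_spec_aux (a b : List (String × List (String × String))) :
    diff_methods a b = diff_methods_alt a b := by
  simp only [diff_methods, diff_methods_alt]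
  rw [foldB_char]
  simp only [List.nil_append]
  have nda := PySem.Dict.nodup_keys_ofList a
  have ndb := PySem.Dict.nodup_keys_ofList b
  rw [PySem.Set.ofList_eq_self_of_nodup _ nda, PySem.Set.ofList_eq_self_of_nodup _ ndb]
  set da := PySem.Dict.ofList a with hda
  set db := PySem.Dict.ofList b with hdb
  set h : String → Bool := fun k =>
    ((PySem.Dict.ofList (da.getD k [])).get? "hash" == (PySem.Dict.ofList (db.getD k [])).get? "hash") with hh
  have memA : ∀ k ∈ da.keys, da.contains k = true := by
    intro k hk; exact (PySem.Dict.contains_iff_mem_keys da k).mpr hk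
  -- added
  have eAdd : (da.keys ++ List.filter (fun k => !da.contains k) db.keys).filter (fun k => !da.contains k)
      = PySem.Set.diff db.keys da.keys := by
    rw [List.filter_append, List.filter_filter]
    have h1 : da.keys.filter (fun k => !da.contains k) = [] := by
      apply List.filter_eq_nil_iff.mpr
      intro k hk; simp [memA k hk]
    rw [h1, List.nil_append]
    unfold PySem.Set.diff
    apply List.filter_congr
    intro k _; simp [PySem.Set.contains, PySem.Dict.contains_eq_decide_mem_keys]
  -- removed
  have eRem : (da.keys ++ List.filter (fun k => !da.contains k) db.keys).filter (fun k => da.contains k && !db.contains k)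
      = PySem.Set.diff da.keys db.keys := by
    rw [List.filter_append, List.filter_filter]
    have h2 : db.keys.filter (fun k => (da.contains k && !db.contains k) && !da.contains k) = [] := by
      apply List.filter_eq_nil_iff.mpr
      intro k _
      cases hc : da.contains k
      · simp
      · simp
    rw [h2, List.append_nil]
    unfold PySem.Set.diff
    apply List.filter_congr
    intro k hk; simp [memA k hk, PySem.Set.contains, PySem.Dict.contains_eq_decide_mem_keys]
  -- changed / unchanged share this shape
  have eBoth : ∀ q : String → Bool,
      (da.keys ++ List.filter (fun k => !da.contains k) db.keys).filter (fun k => da.contains k && db.contains k && q k)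
      = List.filter q (PySem.Set.inter da.keys db.keys) := by
    intro q
    rw [List.filter_append, List.filter_filter]
    have h3 : db.keys.filter (fun k => (da.contains k && db.contains k && q k) && !da.contains k) = [] := by
      apply List.filter_eq_nil_iff.mpr
      intro k _
      cases hc : da.contains k
      · simp
      · simp
    rw [h3, List.append_nil]
    unfold PySem.Set.inter
    rw [List.filter_filter]
    apply List.filter_congr
    intro k hk
    simp [memA k hk, PySem.Set.contains, PySem.Dict.contains_eq_decide_mem_keys, Bool.and_comm]
  rw [eAdd, eRem, eBoth (fun k => !h k), eBoth h]

-- ===== VERDICT (by name: the statement is the Claim_ definition above) =====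
theorem diff_methods_spec : Claim_equal_diff_methods := by
  intro a b _ _
  unfold Spec_diff_methods
  exact diff_methods_spec_aux a b
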